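-- pv_equiv track=rewrite | github.com/Geunbaek/algorithm | programmers/양궁대회.py | solution
-- ===== SOURCE A (Python) =====
-- def sortFn(arr):
--     return [-arr[0]] + [-el for el in arr[1:][::-1]]
--
-- def solution(n, info):
--     answer = []
--
--     def recur(depth, aScore, lScore, arrow, path):
--         if depth >= 11:
--             if aScore < lScore:
--                 answer.append([lScore - aScore] + path)
--             return
--
--         aCount = info[depth]
--         for lCount in range(arrow + 1):
--             if aCount == 0 and lCount == 0:
--                 recur(depth + 1, aScore, lScore, arrow - lCount, path + [lCount])
--                 continue
--
--             if aCount >= lCount: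
--                 recur(depth + 1, aScore + 10 - depth, lScore, arrow - lCount, path + [lCount])
--             else:
--                 recur(depth + 1, aScore, lScore + 10 - depth, arrow - lCount, path + [lCount])
--
--     recur(0, 0, 0, n, [])
--     if not answer:
--         return [-1]
--
--     answer.sort(key=lambda x: sortFn(x))
--     return answer[0][1:]
-- ===== SOURCE B (Python) =====
-- def solution(n, info):
--     # Enumerate, by a win/lose decision per ring 0..9, the minimal-arrow
--     # distribution for each winning set; leftover arrows go to ring 10 (score 0).
--     # Branches whose arrow cost already exceeds n are pruned.
--     best = None  # ((diff, reversed path), path) of the best candidate so far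
--
--     def go(i, cost, diff, path):
--         nonlocal best
--         if cost > n:
--             return
--         if i >= 10:
--             if diff > 0:
--                 full = path + [n - cost]
--                 key = (diff, full[::-1])
--                 if best is None or best[0] < key:
--                     best = (key, full)
--             return
--         # lose ring i (0 arrows), then win ring i (info[i] + 1 arrows)
--         go(i + 1, cost, diff - (10 - i if info[i] > 0 else 0), path + [0])
--         go(i + 1, cost + info[i] + 1, diff + 10 - i, path + [info[i] + 1])
--
--     go(0, 0, 0, [])
--     return [-1] if best is None else best[1]
-- ===== Notes on version B (the rewrite author's own statement) =====
-- stated objective: faster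
-- what changed: B replaces A's exhaustive DFS over every distribution of up to n arrows across the 11 rings (collecting all winning outcomes and sorting them) by a DFS over the 2^10 win/lose decisions for rings 0-9, giving each won ring the minimal info[i]+1 arrows, sending the leftover to the score-0 ring, and keeping only the best (diff, reversed-path) candidate.
import Mathlib
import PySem

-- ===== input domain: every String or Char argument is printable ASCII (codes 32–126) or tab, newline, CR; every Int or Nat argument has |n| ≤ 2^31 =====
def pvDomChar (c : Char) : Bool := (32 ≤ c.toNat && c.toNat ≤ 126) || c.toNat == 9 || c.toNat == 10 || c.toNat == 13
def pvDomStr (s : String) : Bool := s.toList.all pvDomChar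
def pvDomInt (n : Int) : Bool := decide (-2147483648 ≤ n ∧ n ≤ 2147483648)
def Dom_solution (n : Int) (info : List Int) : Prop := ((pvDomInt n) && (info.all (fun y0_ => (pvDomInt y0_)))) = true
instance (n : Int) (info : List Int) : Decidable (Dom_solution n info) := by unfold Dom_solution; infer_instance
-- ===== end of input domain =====

-- B replaces A's DFS over all (n+1)^11 arrow distributions by a DFS over the 2^10
-- win/lose decisions per ring (minimal arrows on won rings, leftover to ring 10).

-- ===== PORT A =====
-- sortFn: arr[0] via pyGetD (exact here: the key is only applied to the nonempty
-- 12-element answer rows), arr[1:] via slice, [::-1] is reverse (PySem.List.slice?_none_none_neg_one).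
def sortFnA (arr : List Int) : List Int :=
  [-(PySem.List.pyGetD arr 0 0)] ++ (PySem.List.slice arr (some 1) none).reverse.map (fun el => -el)

-- recur: A's nested DFS; the 'for lCount in range(arrow + 1)' loop is a foldl over the
-- materialised range list (answer is the accumulated list).  The Nat fuel only makes the
-- descent structurally total: depth starts at 0 with fuel 11 and the depth >= 11 test
-- always fires before the fuel runs out.
def recurA (info : List Int) (fuel : Nat) (depth aScore lScore arrow : Int) (path : List Int)
    (answer : List (List Int)) : List (List Int) :=
  if 11 ≤ depth then
    (if aScore < lScore then answer ++ [[lScore - aScore] ++ path] else answer)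
  else
    match fuel with
    | 0 => answer   -- unreachable: fuel ≥ 11 - depth throughout
    | fuel + 1 =>
      (PySem.List.pyRange 0 (arrow + 1) 1).foldl
        (fun answer lCount =>
          let aCount := PySem.List.pyGetD info depth 0   -- info[depth]; in range under Pre_
          if aCount = 0 ∧ lCount = 0 then
            recurA info fuel (depth + 1) aScore lScore (arrow - lCount) (path ++ [lCount]) answer
          else if lCount ≤ aCount then
            recurA info fuel (depth + 1) (aScore + 10 - depth) lScore (arrow - lCount)
              (path ++ [lCount]) answer
          else
            recurA info fuel (depth + 1) aScore (lScore + 10 - depth) (arrow - lCount)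
              (path ++ [lCount]) answer)
        answer

def solution (n : Int) (info : List Int) : List Int :=
  let answer := recurA info 11 0 0 0 n [] []
  if answer = [] then [-1]
  else
    -- answer.sort(key=sortFn); answer[0] (nonempty here) then [1:]
    PySem.List.slice (PySem.List.pyGetD (PySem.List.sorted answer sortFnA) 0 []) (some 1) none

-- ===== PORT B =====
-- Python tuple comparison (diff, rev) < (diff', rev'): exact for int/list-of-int tuples
-- (Lean's List Int < is Python's list lexicographic order).
def keyLtB (k1 k2 : Int × List Int) : Bool :=
  decide (k1.1 < k2.1) || (k1.1 == k2.1 && decide (k1.2 < k2.2))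

-- go: B's DFS over win/lose decisions, pruning branches whose cost exceeds n;
-- best is threaded through and returned.  The Nat
-- fuel only makes the descent structurally total: i starts at 0 with fuel 10 and the
-- i >= 10 test always fires before the fuel runs out.
def goB (n : Int) (info : List Int) (fuel : Nat) (i cost diff : Int) (path : List Int)
    (best : Option ((Int × List Int) × List Int)) : Option ((Int × List Int) × List Int) :=
  if n < cost then best   -- 'if cost > n: return' (branch-and-bound prune)
  else if 10 ≤ i then
    if 0 < diff then
      let full := path ++ [n - cost]
      let key := (diff, full.reverse)   -- full[::-1] (PySem.List.slice?_none_none_neg_one)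
      match best with
      | none => some (key, full)
      | some b => if keyLtB b.1 key then some (key, full) else best
    else best
  else
    match fuel with
    | 0 => best   -- unreachable: fuel ≥ 10 - i throughout
    | fuel + 1 =>
      let b1 := goB n info fuel (i + 1) cost
        (if 0 < PySem.List.pyGetD info i 0 then diff - (10 - i) else diff) (path ++ [0]) best
      goB n info fuel (i + 1) (cost + (PySem.List.pyGetD info i 0 + 1)) (diff + 10 - i)
        (path ++ [PySem.List.pyGetD info i 0 + 1]) b1

def solution_alt (n : Int) (info : List Int) : List Int :=
  match goB n info 10 0 0 0 [] none with
  | none => [-1]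
  | some b => b.2

-- ===== PRECONDITION & SPEC =====
-- Pre_ excludes (a) lists too short for the ring counts A reads (all 11 when 0 ≤ n, only
-- info[0] when n < 0), on which A raises IndexError, and (b) for 0 ≤ n, negative values
-- among the first 11 ring counts: arrow counts are the task's natural domain and A's
-- comparisons treat a negative count as an accident (see cites).
def Pre_solution (n : Int) (info : List Int) : Prop :=
  (0 ≤ n ∧ 11 ≤ info.length ∧ ∀ x ∈ info.take 11, 0 ≤ x) ∨ (n < 0 ∧ 1 ≤ info.length)
instance (n : Int) (info : List Int) : Decidable (Pre_solution n info) := by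
  unfold Pre_solution; infer_instance

def pvWitness_solution : Int × List Int := (5, [2, 1, 1, 1, 0, 0, 0, 0, 0, 0, 0])

def Spec_solution (n : Int) (info : List Int) (out : List Int) : Prop := out = solution_alt n info
instance (n : Int) (info : List Int) (out : List Int) : Decidable (Spec_solution n info out) := by unfold Spec_solution; infer_instance

-- ===== CLAIM (what is proved, stated in full; the proofs are below) =====
def Claim_equal_solution : Prop := ∀ (n : Int) (info : List Int), Dom_solution n info → Pre_solution n info → Spec_solution n info (solution n info)


-- ===== LEMMAS AND PROOFS =====

-- ---- proof-side descriptions of what A enumerates ----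

-- all arrow distributions of length k with sum ≤ arrow, in A's generation order
def pathsP (k : Nat) (arrow : Int) : List (List Int) :=
  match k with
  | 0 => [[]]
  | k + 1 => (PySem.List.pyRange 0 (arrow + 1) 1).flatMap
      (fun c => (pathsP k (arrow - c)).map (fun q => c :: q))

-- the score pair A's recursion accumulates along a path suffix starting at ring d
def scoreA (info : List Int) (d a l : Int) (q : List Int) : Int × Int :=
  match q with
  | [] => (a, l)
  | c :: q =>
    let aCount := PySem.List.pyGetD info d 0
    if aCount = 0 ∧ c = 0 then scoreA info (d + 1) a l q
    else if c ≤ aCount then scoreA info (d + 1) (a + 10 - d) l q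
    else scoreA info (d + 1) a (l + 10 - d) q

-- ---- proof-side descriptions of what B enumerates ----

-- the win/lose decisions a path suffix realises, ring by ring from index i
def decsP (info : List Int) (i : Int) (q : List Int) : List Bool :=
  match q with
  | [] => []
  | c :: q => decide (PySem.List.pyGetD info i 0 < c) :: decsP info (i + 1) q

def sufCost (info : List Int) (i : Int) (b : List Bool) : Int :=
  match b with
  | [] => 0
  | d :: b => (if d then PySem.List.pyGetD info i 0 + 1 else 0) + sufCost info (i + 1) b

def sufDiff (info : List Int) (i : Int) (b : List Bool) : Int :=
  match b with
  | [] => 0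
  | d :: b => (if d then 10 - i else if 0 < PySem.List.pyGetD info i 0 then -(10 - i) else 0)
      + sufDiff info (i + 1) b

def sufPath (info : List Int) (i : Int) (b : List Bool) : List Int :=
  match b with
  | [] => []
  | d :: b => (if d then PySem.List.pyGetD info i 0 + 1 else 0) :: sufPath info (i + 1) b

-- all decision lists of length k, in B's DFS order (lose first)
def subsetsP : Nat → List (List Bool)
  | 0 => [[]]
  | k + 1 => (subsetsP k).map (fun b => false :: b) ++ (subsetsP k).map (fun b => true :: b)

-- B's base-case block, extracted for the fold lemmas
def considerB (n cost diff : Int) (path : List Int)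
    (best : Option ((Int × List Int) × List Int)) : Option ((Int × List Int) × List Int) :=
  if cost ≤ n ∧ 0 < diff then
    match best with
    | none => some ((diff, (path ++ [n - cost]).reverse), path ++ [n - cost])
    | some b => if keyLtB b.1 (diff, (path ++ [n - cost]).reverse)
        then some ((diff, (path ++ [n - cost]).reverse), path ++ [n - cost]) else best
  else best

-- ---- order facts about Python's list/tuple comparison ----

theorem pvConsLt (a b : Int) (l m : List Int) :
    (a :: l) < (b :: m) ↔ (a < b ∨ (a = b ∧ l < m)) := by
  constructor
  · intro h
    have h' : List.Lex (· < ·) (a :: l) (b :: m) := h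
    cases h' with
    | cons h => exact Or.inr ⟨rfl, h⟩
    | rel h => exact Or.inl h
  · rintro (h | ⟨rfl, h⟩)
    · exact (List.Lex.rel h : List.Lex (· < ·) _ _)
    · exact (List.Lex.cons h : List.Lex (· < ·) _ _)

theorem pvConsLe (a b : Int) (l m : List Int) :
    (a :: l) ≤ (b :: m) ↔ (a < b ∨ (a = b ∧ l ≤ m)) := by
  rw [le_iff_lt_or_eq, pvConsLt, List.cons.injEq, le_iff_lt_or_eq]
  tauto

theorem pvMapNegLt (l m : List Int) (hlen : l.length = m.length) :
    (l.map (fun x => -x)) < (m.map (fun x => -x)) ↔ m < l := by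
  induction l generalizing m with
  | nil =>
    cases m with
    | nil => simp
    | cons b m => simp at hlen
  | cons a l ih =>
    cases m with
    | nil => simp at hlen
    | cons b m =>
      simp only [List.map_cons, pvConsLt, neg_lt_neg_iff, neg_inj]
      simp only [List.length_cons, add_left_inj] at hlen
      constructor
      · rintro (h | ⟨h, h2⟩)
        · exact Or.inl h
        · exact Or.inr ⟨h.symm, (ih m hlen).mp h2⟩
      · rintro (h | ⟨h, h2⟩)
        · exact Or.inl h
        · exact Or.inr ⟨h.symm, (ih m hlen).mpr h2⟩

theorem pvMapNegLe (l m : List Int) (hlen : l.length = m.length) :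
    (l.map (fun x => -x)) ≤ (m.map (fun x => -x)) ↔ m ≤ l := by
  rw [← not_lt, ← not_lt, pvMapNegLt m l hlen.symm]

-- keyLtB is the strict product-lex order
theorem keyLtB_iff (p q : Int × List Int) :
    keyLtB p q = true ↔ (p.1 < q.1 ∨ (p.1 = q.1 ∧ p.2 < q.2)) := by
  simp [keyLtB]

theorem keyLtB_false_iff (p q : Int × List Int) :
    keyLtB p q = false ↔ (q.1 < p.1 ∨ (q.1 = p.1 ∧ q.2 ≤ p.2)) := by
  rw [← Bool.not_eq_true, keyLtB_iff]
  push Not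
  constructor
  · rintro ⟨h1, h2⟩
    rcases eq_or_lt_of_le h1 with e | h
    · exact Or.inr ⟨e, h2 e.symm⟩
    · exact Or.inl h
  · rintro (h | ⟨e, h⟩)
    · exact ⟨h.le, fun he => absurd he.symm (ne_of_lt h)⟩
    · exact ⟨e.le, fun _ => h⟩

theorem keyLe_trans {a b c : Int × List Int} (h1 : keyLtB b a = false) (h2 : keyLtB c b = false) :
    keyLtB c a = false := by
  rw [keyLtB_false_iff] at h1 h2 ⊢
  rcases h1 with h1 | ⟨e1, h1⟩ <;> rcases h2 with h2 | ⟨e2, h2⟩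
  · exact Or.inl (h1.trans h2)
  · exact Or.inl (h1.trans_eq e2)
  · exact Or.inl (e1.trans_lt h2)
  · exact Or.inr ⟨e1.trans e2, h1.trans h2⟩

theorem keyLe_antisymm {a b : Int × List Int} (h1 : keyLtB b a = false) (h2 : keyLtB a b = false) :
    a = b := by
  rw [keyLtB_false_iff] at h1 h2
  rcases h1 with h1 | ⟨e1, h1⟩ <;> rcases h2 with h2 | ⟨e2, h2⟩
  · exact absurd (h1.trans h2) (lt_irrefl _)
  · exact absurd (h1.trans_eq e2) (lt_irrefl _)
  · exact absurd (h2.trans_eq e1) (lt_irrefl _)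
  · exact Prod.ext e1 (le_antisymm h1 h2)

theorem keyLt_to_le {a b : Int × List Int} (h : keyLtB a b = true) : keyLtB b a = false := by
  rw [keyLtB_iff] at h; rw [keyLtB_false_iff]
  rcases h with h | ⟨e, h⟩
  · exact Or.inl h
  · exact Or.inr ⟨e, h.le⟩

theorem keyLtB_self (a : Int × List Int) : keyLtB a a = false := by
  rw [keyLtB_false_iff]; exact Or.inr ⟨rfl, le_rfl⟩

-- ---- A's recursion enumerates exactly pathsP, scored by scoreA ----

def entryF (info : List Int) (d a l : Int) (path : List Int) (q : List Int) : Option (List Int) :=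
  if (scoreA info d a l q).1 < (scoreA info d a l q).2
  then some ([(scoreA info d a l q).2 - (scoreA info d a l q).1] ++ (path ++ q)) else none

theorem entryF_cons (info : List Int) (d a l c : Int) (path q : List Int) :
    entryF info d a l path (c :: q) =
      (if PySem.List.pyGetD info d 0 = 0 ∧ c = 0 then entryF info (d + 1) a l (path ++ [c]) q
       else if c ≤ PySem.List.pyGetD info d 0 then
         entryF info (d + 1) (a + 10 - d) l (path ++ [c]) q
       else entryF info (d + 1) a (l + 10 - d) (path ++ [c]) q) := by
  simp only [entryF, scoreA]
  split_ifs <;> simp [List.append_assoc]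

theorem recurA_eq (info : List Int) (k : Nat) :
    ∀ a l arrow path ans, recurA info k (11 - (k : Int)) a l arrow path ans
      = ans ++ (pathsP k arrow).filterMap (entryF info (11 - (k : Int)) a l path) := by
  induction k with
  | zero =>
    intro a l arrow path ans
    rw [recurA, if_pos (by norm_num)]
    have hs : scoreA info 11 a l [] = (a, l) := rfl
    simp only [pathsP, List.filterMap_cons, List.filterMap_nil, entryF, Nat.cast_zero, sub_zero, hs]
    by_cases h : a < l
    · simp [h]
    · simp [h]
  | succ k ih =>
    intro a l arrow path ans
    have hd : ¬ (11 ≤ (11 - ((k + 1 : Nat) : Int))) := by push_cast; omega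
    have hstep : (11 - ((k + 1 : Nat) : Int)) + 1 = 11 - (k : Int) := by push_cast; omega
    rw [recurA, if_neg hd]
    set d : Int := 11 - ((k + 1 : Nat) : Int) with hdef
    have loop : ∀ (lcs : List Int) (ans : List (List Int)),
        lcs.foldl
          (fun answer lCount =>
            if PySem.List.pyGetD info d 0 = 0 ∧ lCount = 0 then
              recurA info k (d + 1) a l (arrow - lCount) (path ++ [lCount]) answer
            else if lCount ≤ PySem.List.pyGetD info d 0 then
              recurA info k (d + 1) (a + 10 - d) l (arrow - lCount) (path ++ [lCount]) answer
            else
              recurA info k (d + 1) a (l + 10 - d) (arrow - lCount) (path ++ [lCount]) answer)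
          ans
        = ans ++ lcs.flatMap
            (fun c => (pathsP k (arrow - c)).filterMap (fun q => entryF info d a l path (c :: q))) := by
      intro lcs
      induction lcs with
      | nil => intro ans; simp
      | cons c rest ihl =>
        intro ans
        rw [List.foldl_cons, ihl]
        simp only [List.flatMap_cons, ← List.append_assoc]
        congr 1
        split_ifs with h1 h2
        · have ih' := ih a l (arrow - c) (path ++ [c]) ans
          rw [← hstep] at ih'
          rw [ih']
          congr 1
          apply List.filterMap_congr
          intro q _
          rw [entryF_cons, if_pos h1, hstep]
        · have ih' := ih (a + 10 - d) l (arrow - c) (path ++ [c]) ans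
          rw [← hstep] at ih'
          rw [ih']
          congr 1
          apply List.filterMap_congr
          intro q _
          rw [entryF_cons, if_neg h1, if_pos h2, hstep]
        · have ih' := ih a (l + 10 - d) (arrow - c) (path ++ [c]) ans
          rw [← hstep] at ih'
          rw [ih']
          congr 1
          apply List.filterMap_congr
          intro q _
          rw [entryF_cons, if_neg h1, if_neg h2, hstep]
    rw [loop]
    congr 1
    show _ = (pathsP (k + 1) arrow).filterMap (entryF info d a l path)
    rw [pathsP]
    rw [List.filterMap_flatMap]
    apply List.flatMap_congr
    intro c _
    rw [List.filterMap_map]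
    rfl

theorem mem_pathsP (k : Nat) : ∀ (arrow : Int) (q : List Int),
    q ∈ pathsP k arrow ↔ (q.length = k ∧ (∀ c ∈ q, 0 ≤ c) ∧ (k = 0 ∨ q.sum ≤ arrow)) := by
  induction k with
  | zero =>
    intro arrow q
    simp [pathsP, List.length_eq_zero_iff]
    rintro rfl
    simp
  | succ k ih =>
    intro arrow q
    simp only [pathsP, List.mem_flatMap, List.mem_map, PySem.List.mem_pyRange_one]
    constructor
    · rintro ⟨c, ⟨hc0, hca⟩, q', hq', rfl⟩
      obtain ⟨hlen, hnn, hsum⟩ := (ih (arrow - c) q').mp hq'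
      refine ⟨by simp [hlen], ?_, ?_⟩
      · intro x hx
        rcases List.mem_cons.mp hx with rfl | hx
        · exact hc0
        · exact hnn x hx
      · right
        rcases hsum with h0 | hs
        · subst h0
          rw [List.length_eq_zero_iff] at hlen
          subst hlen
          simpa using (by omega : c + 1 ≤ arrow + 1)
        · simp only [List.sum_cons]
          omega
    · rintro ⟨hlen, hnn, hsum⟩
      rcases q with _ | ⟨c, q'⟩
      · simp at hlen
      · have hc0 : 0 ≤ c := hnn c (List.mem_cons_self)
        have hnn' : ∀ x ∈ q', 0 ≤ x := fun x hx => hnn x (List.mem_cons_of_mem _ hx)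
        have hs' : 0 ≤ q'.sum := List.sum_nonneg hnn'
        have hsum' : c + q'.sum ≤ arrow := by
          rcases hsum with h | h
          · simp at h
          · simpa [List.sum_cons] using h
        refine ⟨c, ⟨hc0, by omega⟩, q', (ih (arrow - c) q').mpr ?_, rfl⟩
        refine ⟨by simpa using hlen, hnn', ?_⟩
        rcases Nat.eq_zero_or_pos k with h | _
        · exact Or.inl h
        · right; omega

theorem pathsP_nil (k : Nat) (arrow : Int) (hk : k ≠ 0) (ha : arrow < 0) :
    pathsP k arrow = [] := by
  cases k with
  | zero => exact absurd rfl hk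
  | succ k =>
    rw [pathsP, PySem.List.pyRange_one_eq_nil (by omega)]
    simp

theorem scoreA_sub (info : List Int) : ∀ (q : List Int) (i a l : Int), (∀ c ∈ q, 0 ≤ c) →
    (scoreA info i a l q).2 - (scoreA info i a l q).1
      = (l - a) + sufDiff info i (decsP info i q) := by
  intro q
  induction q with
  | nil => intro i a l _; simp [scoreA, sufDiff, decsP]
  | cons c q ih =>
    intro i a l hnn
    have hc : 0 ≤ c := hnn c List.mem_cons_self
    have hnn' : ∀ x ∈ q, 0 ≤ x := fun x hx => hnn x (List.mem_cons_of_mem _ hx)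
    simp only [scoreA, decsP, sufDiff]
    by_cases h1 : PySem.List.pyGetD info i 0 = 0 ∧ c = 0
    · have hw : (decide (PySem.List.pyGetD info i 0 < c)) = false := by
        simp only [decide_eq_false_iff_not]; omega
      rw [if_pos h1, hw, ih (i + 1) a l hnn']
      rw [if_neg Bool.false_ne_true, if_neg (by omega : ¬ ((0:Int) < PySem.List.pyGetD info i 0))]
      ring
    · by_cases h2 : c ≤ PySem.List.pyGetD info i 0
      · have hw : (decide (PySem.List.pyGetD info i 0 < c)) = false := by
          simp only [decide_eq_false_iff_not]; omega
        have hpos : (0:Int) < PySem.List.pyGetD info i 0 := by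
          rcases not_and_or.mp h1 with h | h <;> omega
        rw [if_neg h1, if_pos h2, hw, ih (i + 1) (a + 10 - i) l hnn']
        rw [if_neg Bool.false_ne_true, if_pos hpos]
        ring
      · have hw : (decide (PySem.List.pyGetD info i 0 < c)) = true := by
          simp only [decide_eq_true_eq]; omega
        rw [if_neg h1, if_neg h2, hw, ih (i + 1) a (l + 10 - i) hnn']
        rw [if_pos rfl]
        ring

theorem length_decsP (info : List Int) : ∀ (q : List Int) (i : Int), (decsP info i q).length = q.length := by
  intro q
  induction q with
  | nil => intro i; rfl
  | cons c q ih => intro i; simp [decsP, ih]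

theorem length_sufPath (info : List Int) : ∀ (b : List Bool) (i : Int), (sufPath info i b).length = b.length := by
  intro b
  induction b with
  | nil => intro i; rfl
  | cons d b ih => intro i; simp [sufPath, ih]

theorem sum_sufPath (info : List Int) : ∀ (b : List Bool) (i : Int), (sufPath info i b).sum = sufCost info i b := by
  intro b
  induction b with
  | nil => intro i; rfl
  | cons d b ih => intro i; simp [sufPath, sufCost, ih]

theorem nonneg_sufPath (info : List Int) : ∀ (b : List Bool) (i : Int),
    (∀ j : Int, i ≤ j → j < i + b.length → 0 ≤ PySem.List.pyGetD info j 0) →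
    ∀ c ∈ sufPath info i b, 0 ≤ c := by
  intro b
  induction b with
  | nil => intro i _ c hc; simp [sufPath] at hc
  | cons d b ih =>
    intro i hpos c hc
    rcases List.mem_cons.mp hc with rfl | hc
    · have := hpos i le_rfl (by simp only [List.length_cons]; push_cast; omega)
      split_ifs <;> omega
    · exact ih (i + 1) (fun j h1 h2 => hpos j (by omega) (by simp only [List.length_cons] at h2 ⊢; push_cast at h2 ⊢; omega)) c hc

theorem decsP_sufPath (info : List Int) : ∀ (b : List Bool) (i : Int),
    (∀ j : Int, i ≤ j → j < i + b.length → 0 ≤ PySem.List.pyGetD info j 0) →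
    decsP info i (sufPath info i b) = b := by
  intro b
  induction b with
  | nil => intro i _; rfl
  | cons d b ih =>
    intro i hpos
    have h0 : 0 ≤ PySem.List.pyGetD info i 0 := hpos i le_rfl (by simp only [List.length_cons]; push_cast; omega)
    have ih' := ih (i + 1) (fun j h1 h2 => hpos j (by omega) (by simp only [List.length_cons] at h2 ⊢; push_cast at h2 ⊢; omega))
    cases d with
    | true => simp [sufPath, decsP, ih']
    | false => simp [sufPath, decsP, ih']; omega

theorem decsP_append (info : List Int) : ∀ (x y : List Int) (i : Int),
    decsP info i (x ++ y) = decsP info i x ++ decsP info (i + x.length) y := by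
  intro x
  induction x with
  | nil => intro y i; simp [decsP]
  | cons c x ih =>
    intro y i
    simp only [List.cons_append, decsP, ih, List.length_cons]
    push_cast
    rw [show i + ((x.length : Int) + 1) = i + 1 + (x.length : Int) by ring]

theorem sufDiff_append (info : List Int) : ∀ (b1 b2 : List Bool) (i : Int),
    sufDiff info i (b1 ++ b2) = sufDiff info i b1 + sufDiff info (i + b1.length) b2 := by
  intro b1
  induction b1 with
  | nil => intro b2 i; simp [sufDiff]
  | cons d b1 ih =>
    intro b2 i
    simp only [List.cons_append, sufDiff, ih, List.length_cons]
    push_cast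
    rw [show i + ((b1.length : Int) + 1) = i + 1 + (b1.length : Int) by ring]
    ring

theorem sufDiff_ten (info : List Int) (d : Bool) : sufDiff info 10 [d] = 0 := by
  cases d <;> simp [sufDiff]

theorem sufCost_le_sum (info : List Int) : ∀ (q : List Int) (i : Int), (∀ c ∈ q, 0 ≤ c) →
    sufCost info i (decsP info i q) ≤ q.sum ∧
      (q.sum ≤ sufCost info i (decsP info i q) → q = sufPath info i (decsP info i q)) := by
  intro q
  induction q with
  | nil => intro i _; simp [decsP, sufCost, sufPath]
  | cons c q ih =>
    intro i hnn
    have hc : 0 ≤ c := hnn c List.mem_cons_self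
    have hnn' : ∀ x ∈ q, 0 ≤ x := fun x hx => hnn x (List.mem_cons_of_mem _ hx)
    obtain ⟨ihle, iheq⟩ := ih (i + 1) hnn'
    have hcs : 0 ≤ q.sum := List.sum_nonneg hnn'
    simp only [decsP, sufCost, sufPath, List.sum_cons]
    by_cases hw : PySem.List.pyGetD info i 0 < c
    · simp [hw]
      constructor
      · omega
      · intro hle
        have h1 : c = PySem.List.pyGetD info i 0 + 1 := by omega
        have h2 : q.sum ≤ sufCost info (i + 1) (decsP info (i + 1) q) := by omega
        exact ⟨h1, iheq h2⟩
    · simp [hw]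
      constructor
      · omega
      · intro hle
        have h1 : c = 0 := by omega
        have h2 : q.sum ≤ sufCost info (i + 1) (decsP info (i + 1) q) := by omega
        exact ⟨h1, iheq h2⟩

theorem mem_subsetsP (k : Nat) : ∀ (b : List Bool), b ∈ subsetsP k ↔ b.length = k := by
  induction k with
  | zero => intro b; simp [subsetsP, List.length_eq_zero_iff]
  | succ k ih =>
    intro b
    simp only [subsetsP, List.mem_append, List.mem_map]
    constructor
    · rintro (⟨t, ht, rfl⟩ | ⟨t, ht, rfl⟩) <;> simp [(ih t).mp ht]
    · intro hlen
      rcases b with _ | ⟨d, t⟩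
      · simp at hlen
      · have : t.length = k := by simpa using hlen
        cases d
        · exact Or.inl ⟨t, (ih t).mpr this, rfl⟩
        · exact Or.inr ⟨t, (ih t).mpr this, rfl⟩

-- ---- B's recursion folds considerB over all decision lists ----

theorem goB_base (n : Int) (info : List Int) (fuel : Nat) (i cost diff : Int) (path : List Int)
    (best : Option ((Int × List Int) × List Int)) (h : 10 ≤ i) :
    goB n info fuel i cost diff path best = considerB n cost diff path best := by
  rw [goB.eq_def]
  unfold considerB
  by_cases hnc : n < cost
  · rw [if_pos hnc, if_neg (fun hc => absurd hc.1 (by omega))]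
  · rw [if_neg hnc, if_pos h]
    by_cases hd : 0 < diff
    · rw [if_pos hd, if_pos ⟨by omega, hd⟩]
    · rw [if_neg hd, if_neg (fun hc => hd hc.2)]

theorem sufCost_nonneg (info : List Int) : ∀ (b : List Bool) (i : Int),
    (∀ j : Int, i ≤ j → j < i + b.length → 0 ≤ PySem.List.pyGetD info j 0) →
    0 ≤ sufCost info i b := by
  intro b
  induction b with
  | nil => intro i _; simp [sufCost]
  | cons d b ih =>
    intro i hpos
    have h0 : 0 ≤ PySem.List.pyGetD info i 0 :=
      hpos i le_rfl (by simp only [List.length_cons]; push_cast; omega)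
    have ih' := ih (i + 1)
      (fun j h1 h2 => hpos j (by omega) (by simp only [List.length_cons] at h2 ⊢; push_cast at h2 ⊢; omega))
    rw [sufCost]
    split_ifs <;> omega

theorem fold_skip (n : Int) (C D : List Bool → Int) (P : List Bool → List Int) :
    ∀ (L : List (List Bool)) (best : Option ((Int × List Int) × List Int)),
    (∀ b ∈ L, ¬ (C b ≤ n ∧ 0 < D b)) →
    L.foldl (fun best b => considerB n (C b) (D b) (P b) best) best = best := by
  intro L
  induction L with
  | nil => intro best _; rfl
  | cons b L ihL =>
    intro best hall
    rw [List.foldl_cons]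
    have hskip : considerB n (C b) (D b) (P b) best = best := by
      unfold considerB
      rw [if_neg (hall b List.mem_cons_self)]
    rw [hskip]
    exact ihL best (fun b' hb' => hall b' (List.mem_cons_of_mem _ hb'))

theorem goB_eq (n : Int) (info : List Int) (k : Nat) : k ≤ 10 →
    (∀ j : Int, 10 - (k : Int) ≤ j → j < 10 → 0 ≤ PySem.List.pyGetD info j 0) →
    ∀ (cost diff : Int) (path : List Int)
    (best : Option ((Int × List Int) × List Int)),
    goB n info k (10 - (k : Int)) cost diff path best
      = (subsetsP k).foldl (fun best b =>
          considerB n (cost + sufCost info (10 - (k : Int)) b)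
            (diff + sufDiff info (10 - (k : Int)) b)
            (path ++ sufPath info (10 - (k : Int)) b) best) best := by
  induction k with
  | zero =>
    intro _ _ cost diff path best
    rw [goB_base _ _ _ _ _ _ _ _ (by norm_num)]
    simp [subsetsP, sufCost, sufDiff, sufPath]
  | succ k ih =>
    intro hk hpos cost diff path best
    have hi : ¬ (10 ≤ (10 - ((k + 1 : Nat) : Int))) := by push_cast; omega
    have hstep : (10 - ((k + 1 : Nat) : Int)) + 1 = 10 - (k : Int) := by push_cast; omega
    have ih' := ih (by omega) (fun j h1 h2 => hpos j (by push_cast at h1 ⊢; omega) h2)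
    rw [goB.eq_def]
    by_cases hnc : n < cost
    · rw [if_pos hnc]
      symm
      apply fold_skip
      intro b hb
      have hblen := (mem_subsetsP (k + 1) b).mp hb
      have hc0 : 0 ≤ sufCost info (10 - ((k + 1 : Nat) : Int)) b := by
        apply sufCost_nonneg
        intro j h1 h2
        rw [hblen] at h2
        exact hpos j h1 (by push_cast at h2 ⊢; omega)
      exact fun hc => absurd hc.1 (by omega)
    rw [if_neg hnc, if_neg hi]
    dsimp only
    set i : Int := 10 - ((k + 1 : Nat) : Int) with hidef
    rw [show i + 1 = 10 - (k : Int) from hstep]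
    rw [ih', ih']
    rw [subsetsP, List.foldl_append, List.foldl_map, List.foldl_map]
    have hlose : (fun (best : Option ((Int × List Int) × List Int)) (b : List Bool) =>
        considerB n (cost + sufCost info i (false :: b)) (diff + sufDiff info i (false :: b))
          (path ++ sufPath info i (false :: b)) best)
        = (fun best b =>
        considerB n (cost + sufCost info (10 - (k : Int)) b)
          ((if 0 < PySem.List.pyGetD info i 0 then diff - (10 - i) else diff) + sufDiff info (10 - (k : Int)) b)
          ((path ++ [0]) ++ sufPath info (10 - (k : Int)) b) best) := by
      funext best b
      simp only [sufCost, sufDiff, sufPath, Bool.false_eq_true, if_false, hstep, List.append_assoc,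
        List.cons_append, List.nil_append, zero_add]
      by_cases hp : 0 < PySem.List.pyGetD info i 0
      · rw [if_pos hp, if_pos hp]
        ring_nf
      · rw [if_neg hp, if_neg hp]
        ring_nf
    have hwin : (fun (best : Option ((Int × List Int) × List Int)) (b : List Bool) =>
        considerB n (cost + sufCost info i (true :: b)) (diff + sufDiff info i (true :: b))
          (path ++ sufPath info i (true :: b)) best)
        = (fun best b =>
        considerB n ((cost + (PySem.List.pyGetD info i 0 + 1)) + sufCost info (10 - (k : Int)) b)
          ((diff + 10 - i) + sufDiff info (10 - (k : Int)) b)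
          ((path ++ [PySem.List.pyGetD info i 0 + 1]) ++ sufPath info (10 - (k : Int)) b) best) := by
      funext best b
      simp only [sufCost, sufDiff, sufPath, if_true, hstep, List.append_assoc,
        List.cons_append, List.nil_append]
      ring_nf
    rw [hlose, hwin]

-- ---- invariants of folding considerB ----

theorem considerB_none_iff (n c d : Int) (p : List Int) (best : Option ((Int × List Int) × List Int)) :
    considerB n c d p best = none ↔ (best = none ∧ ¬ (c ≤ n ∧ 0 < d)) := by
  cases best with
  | none =>
    unfold considerB
    split_ifs with h <;> simp [h]
  | some b =>
    unfold considerB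
    split_ifs with h
    · dsimp only
      split_ifs <;> simp [h]
    · simp [h]

theorem considerB_some_src (n c d : Int) (p : List Int) (best : Option ((Int × List Int) × List Int))
    (x : (Int × List Int) × List Int) (hx : considerB n c d p best = some x) :
    best = some x ∨ ((c ≤ n ∧ 0 < d) ∧ x = ((d, (p ++ [n - c]).reverse), p ++ [n - c])) := by
  unfold considerB at hx
  split_ifs at hx with h
  · cases best with
    | none =>
      dsimp only at hx
      exact Or.inr ⟨h, (Option.some.inj hx).symm⟩
    | some b =>
      dsimp only at hx
      split_ifs at hx with h2
      · exact Or.inr ⟨h, (Option.some.inj hx).symm⟩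
      · exact Or.inl hx
  · exact Or.inl hx

theorem considerB_mono (n c d : Int) (p : List Int) (y : (Int × List Int) × List Int) :
    ∃ z, considerB n c d p (some y) = some z ∧ keyLtB z.1 y.1 = false := by
  unfold considerB
  split_ifs with h
  · dsimp only
    split_ifs with h2
    · exact ⟨_, rfl, keyLt_to_le h2⟩
    · exact ⟨y, rfl, keyLtB_self _⟩
  · exact ⟨y, rfl, keyLtB_self _⟩

theorem considerB_take (n c d : Int) (p : List Int) (best : Option ((Int × List Int) × List Int))
    (h : c ≤ n ∧ 0 < d) :
    ∃ z, considerB n c d p best = some z ∧ keyLtB z.1 (d, (p ++ [n - c]).reverse) = false := by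
  unfold considerB
  rw [if_pos h]
  cases best with
  | none => exact ⟨_, rfl, keyLtB_self _⟩
  | some b =>
    dsimp only
    split_ifs with h2
    · exact ⟨_, rfl, keyLtB_self _⟩
    · refine ⟨b, rfl, ?_⟩
      simpa using h2

theorem foldC_mono (n : Int) (C D : List Bool → Int) (P : List Bool → List Int) :
    ∀ (L : List (List Bool)) (y x : (Int × List Int) × List Int),
    L.foldl (fun best b => considerB n (C b) (D b) (P b) best) (some y) = some x →
    keyLtB x.1 y.1 = false := by
  intro L
  induction L with
  | nil => intro y x hx; simp at hx; rw [hx.symm]; exact keyLtB_self _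
  | cons b L ihL =>
    intro y x hx
    simp only [List.foldl_cons] at hx
    obtain ⟨z, hz, hzy⟩ := considerB_mono n (C b) (D b) (P b) y
    rw [hz] at hx
    exact keyLe_trans hzy (ihL z x hx)

theorem foldC_none_iff (n : Int) (C D : List Bool → Int) (P : List Bool → List Int) :
    ∀ (L : List (List Bool)) (best : Option ((Int × List Int) × List Int)),
    L.foldl (fun best b => considerB n (C b) (D b) (P b) best) best = none ↔
      (best = none ∧ ∀ b ∈ L, ¬ (C b ≤ n ∧ 0 < D b)) := by
  intro L
  induction L with
  | nil => intro best; simp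
  | cons b L ihL =>
    intro best
    simp only [List.foldl_cons, ihL, considerB_none_iff]
    constructor
    · rintro ⟨⟨h1, h2⟩, h3⟩
      exact ⟨h1, fun b' hb' => by
        rcases List.mem_cons.mp hb' with rfl | hb'
        · exact h2
        · exact h3 b' hb'⟩
    · rintro ⟨h1, h2⟩
      exact ⟨⟨h1, h2 b List.mem_cons_self⟩, fun b' hb' => h2 b' (List.mem_cons_of_mem _ hb')⟩

theorem foldC_some_src (n : Int) (C D : List Bool → Int) (P : List Bool → List Int) :
    ∀ (L : List (List Bool)) (best : Option ((Int × List Int) × List Int))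
      (x : (Int × List Int) × List Int),
    L.foldl (fun best b => considerB n (C b) (D b) (P b) best) best = some x →
    best = some x ∨ ∃ b ∈ L, (C b ≤ n ∧ 0 < D b)
      ∧ x = ((D b, (P b ++ [n - C b]).reverse), P b ++ [n - C b]) := by
  intro L
  induction L with
  | nil => intro best x hx; simp at hx; exact Or.inl hx
  | cons b L ihL =>
    intro best x hx
    simp only [List.foldl_cons] at hx
    rcases ihL _ x hx with h | ⟨b', hb', hok, hval⟩
    · rcases considerB_some_src n (C b) (D b) (P b) best x h with h' | ⟨hok, hval⟩
      · exact Or.inl h'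
      · exact Or.inr ⟨b, List.mem_cons_self, hok, hval⟩
    · exact Or.inr ⟨b', List.mem_cons_of_mem _ hb', hok, hval⟩

theorem foldC_max (n : Int) (C D : List Bool → Int) (P : List Bool → List Int) :
    ∀ (L : List (List Bool)) (best : Option ((Int × List Int) × List Int))
      (x : (Int × List Int) × List Int),
    L.foldl (fun best b => considerB n (C b) (D b) (P b) best) best = some x →
    ∀ b ∈ L, (C b ≤ n ∧ 0 < D b) →
      keyLtB x.1 (D b, (P b ++ [n - C b]).reverse) = false := by
  intro L
  induction L with
  | nil => intro best x _ b hb; simp at hb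
  | cons b0 L ihL =>
    intro best x hx b hb hok
    simp only [List.foldl_cons] at hx
    rcases List.mem_cons.mp hb with rfl | hb'
    · obtain ⟨z, hz, hzk⟩ := considerB_take n (C b) (D b) (P b) best hok
      rw [hz] at hx
      exact keyLe_trans hzk (foldC_mono n C D P L z x hx)
    · exact ihL _ x hx b hb' hok

-- ---- bridging A's sort key with B's comparison key ----

theorem pvKeyHead (xs : List (List Int)) (m : List Int) (t : List (List Int))
    (h : PySem.List.sorted xs sortFnA = m :: t) :
    ∀ y ∈ xs, sortFnA m ≤ sortFnA y := by
  apply PySem.List.key_head_sorted_le xs sortFnA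
  have hinst : (fun (a b : List Int) => a.decidableLT b)
      = (LinearOrder.toDecidableLT : DecidableLT (List Int)) := by
    funext a b
    exact Subsingleton.elim _ _
  rw [← hinst]
  exact h

theorem pre_pyGetD (info : List Int) (h11 : 11 ≤ info.length) (hposx : ∀ x ∈ info.take 11, 0 ≤ x) :
    ∀ j : Int, 0 ≤ j → j < 11 → 0 ≤ PySem.List.pyGetD info j 0 := by
  intro j h0 hj
  have hjn : j.toNat < info.length := by omega
  have hj' : j = ((j.toNat : Nat) : Int) := by omega
  rw [hj', PySem.List.pyGetD_natCast, List.getD_eq_getElem _ _ hjn]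
  have h11n : j.toNat < 11 := by omega
  have hget : (info.take 11)[j.toNat]'(by simp [List.length_take]; omega) = info[j.toNat] :=
    List.getElem_take
  exact hposx _ (hget ▸ List.getElem_mem _)

theorem sortFnA_eval (d : Int) (p : List Int) :
    sortFnA (d :: p) = -d :: (p.reverse.map (fun el => -el)) := by
  simp [sortFnA, PySem.List.pyGetD_zero_cons, PySem.List.slice_from_one]

theorem sortFnA_le_iff (d d' : Int) (p p' : List Int) (hp : p.length = 11) (hp' : p'.length = 11) :
    sortFnA (d :: p) ≤ sortFnA (d' :: p') ↔ keyLtB (d, p.reverse) (d', p'.reverse) = false := by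
  rw [sortFnA_eval, sortFnA_eval, pvConsLe, keyLtB_false_iff,
    pvMapNegLe _ _ (by simp [hp, hp']), neg_lt_neg_iff, neg_inj]
  constructor
  · rintro (h | ⟨h, h2⟩)
    · exact Or.inl h
    · exact Or.inr ⟨h.symm, h2⟩
  · rintro (h | ⟨h, h2⟩)
    · exact Or.inl h
    · exact Or.inr ⟨h.symm, h2⟩

-- ---- the correspondence between candidates of A and of B ----

theorem mem_answer (info : List Int) (n : Int) : ∀ e, e ∈ recurA info 11 0 0 0 n [] [] ↔
    ∃ q, q ∈ pathsP 11 n ∧ 0 < sufDiff info 0 (decsP info 0 q)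
      ∧ e = sufDiff info 0 (decsP info 0 q) :: q := by
  have hA : recurA info 11 0 0 0 n [] [] = (pathsP 11 n).filterMap (entryF info 0 0 0 []) := by
    have h := recurA_eq info 11 0 0 n [] []
    simpa using h
  intro e
  rw [hA, List.mem_filterMap]
  constructor
  · rintro ⟨q, hq, he⟩
    have hq' := (mem_pathsP 11 n q).mp hq
    have hd := scoreA_sub info q 0 0 0 hq'.2.1
    simp only [sub_zero, zero_sub, zero_add] at hd
    unfold entryF at he
    split_ifs at he with hcond
    · refine ⟨q, hq, by omega, ?_⟩
      have h2 := Option.some.inj he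
      simp only [List.nil_append, List.singleton_append] at h2
      rw [← h2, hd]
  · rintro ⟨q, hq, hdpos, rfl⟩
    refine ⟨q, hq, ?_⟩
    have hq' := (mem_pathsP 11 n q).mp hq
    have hd := scoreA_sub info q 0 0 0 hq'.2.1
    simp only [sub_zero, zero_sub, zero_add] at hd
    unfold entryF
    rw [if_pos (by omega)]
    simp [hd]

theorem full_in_paths (n : Int) (info : List Int)
    (hpos : ∀ j : Int, 0 ≤ j → j < 11 → 0 ≤ PySem.List.pyGetD info j 0)
    (b : List Bool) (hb : b.length = 10) (hcost : sufCost info 0 b ≤ n) :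
    (sufPath info 0 b ++ [n - sufCost info 0 b]) ∈ pathsP 11 n ∧
    sufDiff info 0 (decsP info 0 (sufPath info 0 b ++ [n - sufCost info 0 b]))
      = sufDiff info 0 b := by
  have hposb : ∀ j : Int, 0 ≤ j → j < 0 + (b.length : Int) → 0 ≤ PySem.List.pyGetD info j 0 := by
    intro j h1 h2; exact hpos j h1 (by rw [hb] at h2; push_cast at h2; omega)
  have hposb' : ∀ j : Int, (0:Int) ≤ j → j < 0 + (b.length : Int) → 0 ≤ PySem.List.pyGetD info j 0 := hposb
  constructor
  · rw [mem_pathsP]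
    refine ⟨by simp [length_sufPath, hb], ?_, Or.inr ?_⟩
    · intro c hc
      rcases List.mem_append.mp hc with hc | hc
      · exact nonneg_sufPath info b 0 (by simpa using hposb) c hc
      · simp at hc; omega
    · rw [List.sum_append, sum_sufPath]
      simp
  · rw [decsP_append, sufDiff_append, decsP_sufPath info b 0 (by simpa using hposb)]
    have hlen : (0:Int) + ((sufPath info 0 b).length : Int) = 10 := by
      rw [length_sufPath, hb]; norm_num
    rw [hlen]
    have hlen2 : (0:Int) + (b.length : Int) = 10 := by rw [hb]; norm_num
    rw [hlen2]
    show sufDiff info 0 b + sufDiff info 10 (decsP info 10 [n - sufCost info 0 b]) = sufDiff info 0 b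
    have : decsP info 10 [n - sufCost info 0 b]
        = [decide (PySem.List.pyGetD info 10 0 < n - sufCost info 0 b)] := rfl
    rw [this, sufDiff_ten]
    ring

theorem q_dominates (n : Int) (info : List Int)
    (hpos : ∀ j : Int, 0 ≤ j → j < 11 → 0 ≤ PySem.List.pyGetD info j 0)
    (q t : List Int) (z : Int) (hq : q = t ++ [z]) (ht : t.length = 10)
    (hnn : ∀ c ∈ q, 0 ≤ c) (hsum : q.sum ≤ n) :
    (decsP info 0 t).length = 10 ∧ sufCost info 0 (decsP info 0 t) ≤ n ∧
    sufDiff info 0 (decsP info 0 t) = sufDiff info 0 (decsP info 0 q) ∧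
    keyLtB (sufDiff info 0 (decsP info 0 t),
        (sufPath info 0 (decsP info 0 t) ++ [n - sufCost info 0 (decsP info 0 t)]).reverse)
      (sufDiff info 0 (decsP info 0 q), q.reverse) = false := by
  have hnt : ∀ c ∈ t, 0 ≤ c := fun c hc => hnn c (by rw [hq]; exact List.mem_append_left _ hc)
  have hz : 0 ≤ z := hnn z (by rw [hq]; exact List.mem_append_right _ (List.mem_singleton_self _))
  have hsumq : q.sum = t.sum + z := by rw [hq]; simp
  obtain ⟨hcle, hceq⟩ := sufCost_le_sum info t 0 hnt
  have hdiffeq : sufDiff info 0 (decsP info 0 t) = sufDiff info 0 (decsP info 0 q) := by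
    rw [hq, decsP_append, sufDiff_append, length_decsP, ht]
    have : (0:Int) + ((10:Nat) : Int) = 10 := by norm_num
    rw [this]
    have hsing : decsP info 10 [z] = [decide (PySem.List.pyGetD info 10 0 < z)] := rfl
    rw [hsing, sufDiff_ten]
    ring
  refine ⟨by rw [length_decsP, ht], by omega, hdiffeq, ?_⟩
  rw [keyLtB_false_iff]
  right
  constructor
  · exact hdiffeq.symm
  · show q.reverse ≤ _
    rw [hq, List.reverse_append, List.reverse_append]
    simp only [List.reverse_cons, List.reverse_nil, List.nil_append, List.cons_append,
      List.singleton_append]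
    rw [pvConsLe]
    by_cases hzlt : z < n - sufCost info 0 (decsP info 0 t)
    · exact Or.inl hzlt
    · right
      have hzeq : z = n - sufCost info 0 (decsP info 0 t) := by omega
      refine ⟨hzeq, ?_⟩
      have hteq : t = sufPath info 0 (decsP info 0 t) := hceq (by omega)
      rw [← hteq]

-- ===== VERDICT (by name: the statement is the Claim_ definition above) =====
theorem solution_spec : Claim_equal_solution := by
  intro n info _ hpre
  unfold Spec_solution
  rcases hpre with ⟨hn0, h11, hposx⟩ | ⟨hneg, hlen1⟩
  case inr =>
    -- n < 0: A's range loop is empty and B's prune fires immediately; both give [-1]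
    simp only [solution, solution_alt]
    have hA : recurA info 11 0 0 0 n [] [] = [] := by
      have h := recurA_eq info 11 0 0 n [] []
      norm_num at h
      rw [h, pathsP_nil 11 n (by norm_num) hneg]
      simp
    have hB : goB n info 10 0 0 0 [] none = none := by
      rw [goB.eq_def, if_pos (by omega : n < (0:Int))]
    rw [hA, if_pos rfl, hB]
  case inl =>
  have hpos := pre_pyGetD info h11 hposx
  have hB : goB n info 10 0 0 0 [] none
      = (subsetsP 10).foldl (fun best b =>
          considerB n (sufCost info 0 b) (sufDiff info 0 b) (sufPath info 0 b) best) none := by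
    have h := goB_eq n info 10 (le_refl 10)
      (fun j h1 h2 => hpos j (by push_cast at h1; omega) (by omega)) 0 0 [] none
    norm_num at h
    exact h
  simp only [solution, solution_alt]
  rw [hB]
  rcases hfold : (subsetsP 10).foldl (fun best b =>
      considerB n (sufCost info 0 b) (sufDiff info 0 b) (sufPath info 0 b) best) none with _ | x
  · -- B found no candidate: A's answer list is empty too
    have hall := ((foldC_none_iff n _ _ _ (subsetsP 10) none).mp hfold).2
    have hempty : recurA info 11 0 0 0 n [] [] = [] := by
      by_contra hne
      obtain ⟨e, he⟩ := List.exists_mem_of_ne_nil _ hne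
      obtain ⟨q, hq, hdpos, rfl⟩ := (mem_answer info n e).mp he
      obtain ⟨hlen, hnn, hsum⟩ := (mem_pathsP 11 n q).mp hq
      have hsum' : q.sum ≤ n := by
        rcases hsum with h | h
        · simp at h
        · exact h
      have hne' : q ≠ [] := by intro h; rw [h] at hlen; simp at hlen
      have hqd : q = q.dropLast ++ [q.getLast hne'] := (List.dropLast_append_getLast hne').symm
      have htl : q.dropLast.length = 10 := by rw [List.length_dropLast, hlen]
      obtain ⟨hblen, hbcost, hbdiff, _⟩ :=
        q_dominates n info hpos q q.dropLast (q.getLast hne') hqd htl hnn hsum'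
      exact hall _ ((mem_subsetsP 10 _).mpr hblen) ⟨hbcost, by rw [hbdiff]; exact hdpos⟩
    rw [if_pos hempty]
  · -- B found a best candidate x; A's sorted head is the same distribution
    rcases foldC_some_src n _ _ _ (subsetsP 10) none x hfold with h | ⟨b0, hb0mem, hok0, hval⟩
    · exact absurd h (by simp)
    have hb0len := (mem_subsetsP 10 b0).mp hb0mem
    obtain ⟨hq0mem, hq0diff⟩ := full_in_paths n info hpos b0 hb0len hok0.1
    have he0 : (sufDiff info 0 b0) :: (sufPath info 0 b0 ++ [n - sufCost info 0 b0])
        ∈ recurA info 11 0 0 0 n [] [] :=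
      (mem_answer info n _).mpr
        ⟨_, hq0mem, by rw [hq0diff]; exact hok0.2, by rw [hq0diff]⟩
    have hnonempty : recurA info 11 0 0 0 n [] [] ≠ [] := by
      intro h; rw [h] at he0; simp at he0
    rw [if_neg hnonempty]
    rcases hs : PySem.List.sorted (recurA info 11 0 0 0 n [] []) sortFnA with _ | ⟨h0, t0⟩
    · exact absurd ((PySem.List.sorted_eq_nil_iff _ _ _).mp hs) hnonempty
    have hh0 : h0 ∈ recurA info 11 0 0 0 n [] [] := by
      have hmem0 : h0 ∈ PySem.List.sorted (recurA info 11 0 0 0 n [] []) sortFnA := by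
        rw [hs]; exact List.mem_cons_self
      exact (PySem.List.mem_sorted _ _ _ _).mp hmem0
    obtain ⟨q, hq, hdpos, he⟩ := (mem_answer info n h0).mp hh0
    obtain ⟨hlen, hnn, hsum⟩ := (mem_pathsP 11 n q).mp hq
    have hsum' : q.sum ≤ n := by
      rcases hsum with h | h
      · simp at h
      · exact h
    have hne' : q ≠ [] := by intro h; rw [h] at hlen; simp at hlen
    have hqd : q = q.dropLast ++ [q.getLast hne'] := (List.dropLast_append_getLast hne').symm
    have htl : q.dropLast.length = 10 := by rw [List.length_dropLast, hlen]
    obtain ⟨hblen, hbcost, hbdiff, hdom⟩ :=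
      q_dominates n info hpos q q.dropLast (q.getLast hne') hqd htl hnn hsum'
    have hmax := foldC_max n _ _ _ (subsetsP 10) none x hfold _
      ((mem_subsetsP 10 _).mpr hblen) ⟨hbcost, by rw [hbdiff]; exact hdpos⟩
    have hxq : keyLtB x.1 (sufDiff info 0 (decsP info 0 q), q.reverse) = false :=
      keyLe_trans hdom hmax
    have hfl : (sufPath info 0 b0 ++ [n - sufCost info 0 b0]).length = 11 := by
      simp [length_sufPath, hb0len]
    have hsort := pvKeyHead _ _ _ hs _ he0
    rw [he] at hsort
    have hbr := (sortFnA_le_iff (sufDiff info 0 (decsP info 0 q)) (sufDiff info 0 b0) q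
      (sufPath info 0 b0 ++ [n - sufCost info 0 b0]) hlen hfl).mp hsort
    have hx1 : x.1 = (sufDiff info 0 b0, (sufPath info 0 b0 ++ [n - sufCost info 0 b0]).reverse) := by
      rw [hval]
    rw [← hx1] at hbr
    have hkeq : x.1 = (sufDiff info 0 (decsP info 0 q), q.reverse) := keyLe_antisymm hbr hxq
    have hqfull : q = sufPath info 0 b0 ++ [n - sufCost info 0 b0] := by
      have := hx1.symm.trans hkeq
      have hrev := (Prod.mk.injEq _ _ _ _).mp this |>.2
      exact (List.reverse_inj.mp hrev).symm
    rw [PySem.List.pyGetD_zero_cons, PySem.List.slice_from_one, he]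
    show q = x.2
    rw [hval]
    exact hqfull
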